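-- pv_equiv track=rewrite | github.com/airKlizz/Wikification | evaluation/utils.py | convert_tokens_to_offsets
-- ===== SOURCE A (Python) =====
-- def convert_tokens_to_offsets(tokens):
--   offsets = []
--   last_idx = 0
--   for idx in range(1, len(tokens)+1):
--     if idx == len(tokens):
--       offsets.append((last_idx, idx))
--     else:
--       if tokens[idx][:2] != '##':
--           offsets.append((last_idx, idx))
--           last_idx = idx
--   return offsets
-- ===== SOURCE B (Python) =====
-- def convert_tokens_to_offsets(tokens):
--   if not tokens:
--     return []
--   bounds = [0] + [i for i in range(1, len(tokens)) if tokens[i][:2] != '##'] + [len(tokens)]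
--   return list(zip(bounds, bounds[1:]))
-- ===== Notes on version B (the rewrite author's own statement) =====
-- stated objective: alternative
-- what changed: A emits ranges inline while carrying a running last_idx accumulator through one range(1,len+1) loop; B first collects the word-boundary indices into a bounds list and then forms the ranges by zipping bounds with its own tail, with no running state.
import Mathlib
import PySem

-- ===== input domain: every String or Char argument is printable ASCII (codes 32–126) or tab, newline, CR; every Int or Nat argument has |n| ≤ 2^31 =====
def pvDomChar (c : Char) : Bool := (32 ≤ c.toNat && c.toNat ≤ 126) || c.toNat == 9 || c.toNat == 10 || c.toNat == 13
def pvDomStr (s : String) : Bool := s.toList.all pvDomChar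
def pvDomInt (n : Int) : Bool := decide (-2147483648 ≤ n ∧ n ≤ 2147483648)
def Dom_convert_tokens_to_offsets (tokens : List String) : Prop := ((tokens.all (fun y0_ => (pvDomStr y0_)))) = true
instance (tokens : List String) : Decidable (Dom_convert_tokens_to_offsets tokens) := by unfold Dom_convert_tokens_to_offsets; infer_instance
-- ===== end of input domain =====

-- B replaces A's running last_idx accumulator by building the boundary list first and
-- zipping it with its own tail (objective: alternative decomposition, same cost).

-- ===== PORT A =====
-- literal transliteration of A: fold over range(1, len+1) carrying (offsets, last_idx)
def convert_tokens_to_offsets (tokens : List String) : List (Int × Int) :=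
  let n : Int := PySem.List.len tokens
  let r := (PySem.List.pyRange 1 (n + 1) 1).foldl
    (fun (st : List (Int × Int) × Int) idx =>
      if idx = n then (st.1 ++ [(st.2, idx)], st.2)
      else if PySem.Str.slice ((PySem.List.pyGet? tokens idx).getD "") none (some 2) ≠ "##" then
        (st.1 ++ [(st.2, idx)], idx)
      else st)
    ([], 0)
  r.1

-- ===== PORT B =====
-- literal transliteration of B: boundary list, then zip with its tail (bounds[1:])
def convert_tokens_to_offsets_alt (tokens : List String) : List (Int × Int) :=
  if tokens.isEmpty then []
  else
    let n : Int := PySem.List.len tokens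
    let bounds : List Int :=
      [0] ++ ((PySem.List.pyRange 1 n 1).filter
        (fun i => PySem.Str.slice ((PySem.List.pyGet? tokens i).getD "") none (some 2) ≠ "##")) ++ [n]
    List.zip bounds (PySem.List.slice bounds (some 1) none)

-- ===== PRECONDITION & SPEC =====
def Spec_convert_tokens_to_offsets (tokens : List String) (out : List (Int × Int)) : Prop := out = convert_tokens_to_offsets_alt tokens
instance (tokens : List String) (out : List (Int × Int)) : Decidable (Spec_convert_tokens_to_offsets tokens out) := by unfold Spec_convert_tokens_to_offsets; infer_instance

-- ===== CLAIM (what is proved, stated in full; the proofs are below) =====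
def Claim_equal_convert_tokens_to_offsets : Prop := ∀ (tokens : List String), Dom_convert_tokens_to_offsets tokens → Spec_convert_tokens_to_offsets tokens (convert_tokens_to_offsets tokens)

-- ===== LEMMAS AND PROOFS =====

-- A's loop body, named for the proofs (definitionally A's lambda)
def pvStepA (tokens : List String) (n : Int) (st : List (Int × Int) × Int) (idx : Int) :
    List (Int × Int) × Int :=
  if idx = n then (st.1 ++ [(st.2, idx)], st.2)
  else if PySem.Str.slice ((PySem.List.pyGet? tokens idx).getD "") none (some 2) ≠ "##" then
    (st.1 ++ [(st.2, idx)], idx)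
  else st

-- the shared boundary test
def pvP (tokens : List String) (i : Int) : Bool :=
  PySem.Str.slice ((PySem.List.pyGet? tokens i).getD "") none (some 2) ≠ "##"

-- A's loop invariant: on a list of indices all ≠ n, the fold appends the consecutive
-- pairs of (last :: filtered) and ends with the last filtered boundary as last_idx.
theorem pvFoldA (tokens : List String) (n : Int) (L : List Int)
    (hL : ∀ i ∈ L, i ≠ n) (acc : List (Int × Int)) (last : Int) :
    L.foldl (pvStepA tokens n) (acc, last)
    = (acc ++ List.zip (last :: L.filter (pvP tokens)) (L.filter (pvP tokens)),
       (L.filter (pvP tokens)).getLastD last) := by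
  induction L generalizing acc last with
  | nil => simp
  | cons i L ih =>
    have hin : i ≠ n := hL i (by simp)
    simp only [List.foldl_cons, pvStepA]
    have hL' : ∀ j ∈ L, j ≠ n := fun j hj => hL j (by simp [hj])
    by_cases hp : PySem.Str.slice ((PySem.List.pyGet? tokens i).getD "") none (some 2) ≠ "##"
    · have hf : (i :: L).filter (pvP tokens) = i :: L.filter (pvP tokens) := by
        simp [pvP, hp]
      simp only [if_neg hin, if_pos hp]
      rw [ih hL' (acc ++ [(last, i)]) i, hf, List.zip_cons_cons, List.getLastD_cons]
      simp [List.append_assoc]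
    · have heq := not_not.mp hp
      have hf : (i :: L).filter (pvP tokens) = L.filter (pvP tokens) := by
        simp [pvP, heq]
      simp only [if_neg hin, if_neg hp]
      rw [ih hL' acc last, hf]

-- pairing a boundary list that ends with y: the last pair is (previous last, y)
theorem pvZipSnoc (F : List Int) (x y : Int) :
    List.zip (x :: (F ++ [y])) (F ++ [y])
      = List.zip (x :: F) F ++ [(F.getLastD x, y)] := by
  induction F generalizing x with
  | nil => rfl
  | cons a F ih =>
    simp only [List.cons_append, List.zip_cons_cons, List.getLastD_cons]
    rw [ih a]

-- ===== VERDICT (by name: the statement is the Claim_ definition above) =====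
theorem convert_tokens_to_offsets_spec : Claim_equal_convert_tokens_to_offsets := by
  intro tokens _
  unfold Spec_convert_tokens_to_offsets convert_tokens_to_offsets convert_tokens_to_offsets_alt
  rcases tokens with _ | ⟨t, ts⟩
  · simp [PySem.List.pyRange_one_eq_nil]
  · show (List.foldl (pvStepA (t :: ts) (PySem.List.len (t :: ts))) ([], 0)
        (PySem.List.pyRange 1 (PySem.List.len (t :: ts) + 1) 1)).1 = _
    rw [PySem.List.len_eq]
    have h1n : (1 : Int) ≤ (((t :: ts).length : Nat) : Int) := by
      simp
    rw [PySem.List.pyRange_one_succ_right h1n, List.foldl_append]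
    have hL : ∀ i ∈ PySem.List.pyRange 1 (((t :: ts).length : Nat) : Int) 1,
        i ≠ (((t :: ts).length : Nat) : Int) := by
      intro i hi
      have := (PySem.List.mem_pyRange_one.mp hi).2
      omega
    rw [pvFoldA (t :: ts) (((t :: ts).length : Nat) : Int) _ hL [] 0]
    simp only [List.foldl_cons, List.foldl_nil, pvStepA, if_true,
      List.isEmpty_cons, Bool.false_eq_true, if_false, List.nil_append]
    rw [PySem.List.slice_from_one]
    simp only [List.cons_append, List.tail_cons]
    rw [pvZipSnoc]
    unfold pvP
    simp [decide_not]
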